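-- pv_equiv track=rewrite | github.com/FranchuFranchu/la | la/parse_tabs.py | tabs_to_codeblocks
-- ===== SOURCE A (Python) =====
-- def tabs_to_codeblocks(d):
--     list_index = 0
--     code = list(d)
--     at_newline = True
--     current_indentation = 0
--     this_line_indentation = 0
--     while list_index < len(code):
--         if at_newline:
--             if code[list_index] in (" ", "\t"):
--                 this_line_indentation += 1
--             else:
--                 at_newline = False
--                 difference = this_line_indentation - current_indentation
--                 if difference > 0:
--                     for i in range(difference):
--                         code.insert(list_index,"{")
--                         list_index += 1
--                 elif difference < 0:
--                     for i in range(-difference):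
--                         code.insert(list_index,"}")
--                         list_index += 1
--                     code.insert(list_index, ";")
--                 current_indentation = this_line_indentation
--
--         if not at_newline:
--             if code[list_index] == "\n":
--                 at_newline = True
--                 this_line_indentation = 0
--                 code.insert(list_index,";")
--                 list_index += 1
--         list_index += 1
--
--     # Close indentation again
--     for i in range(current_indentation):
--         code.insert(list_index,"}")
--         list_index += 1
--
--     return "".join(code)
-- ===== SOURCE B (Python) =====
-- def tabs_to_codeblocks(d):
--     parts = d.split("\n")
--     out = []
--     current_indentation = 0
--     for idx, part in enumerate(parts):
--         w = 0
--         while w < len(part) and part[w] in (" ", "\t"):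
--             w += 1
--         terminated = idx < len(parts) - 1
--         if terminated or w < len(part):
--             if w > current_indentation:
--                 braces = "{" * (w - current_indentation)
--             elif w < current_indentation:
--                 braces = "}" * (current_indentation - w) + ";"
--             else:
--                 braces = ""
--             out.append(part[:w] + braces + part[w:] + (";\n" if terminated else ""))
--             current_indentation = w
--         else:
--             out.append(part)
--     return "".join(out) + "}" * current_indentation
-- ===== Notes on version B (the rewrite author's own statement) =====
-- stated objective: faster
-- what changed: Replaces A's in-place character-list mutation machine (index insertions into a growing list while walking it with a cursor and an at_newline flag) by a single pass over the lines of d split on the newline character: each line's leading-whitespace width is measured once and the line is emitted as one string with the brace delta in front, so no list is ever mutated or re-indexed.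
import Mathlib
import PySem

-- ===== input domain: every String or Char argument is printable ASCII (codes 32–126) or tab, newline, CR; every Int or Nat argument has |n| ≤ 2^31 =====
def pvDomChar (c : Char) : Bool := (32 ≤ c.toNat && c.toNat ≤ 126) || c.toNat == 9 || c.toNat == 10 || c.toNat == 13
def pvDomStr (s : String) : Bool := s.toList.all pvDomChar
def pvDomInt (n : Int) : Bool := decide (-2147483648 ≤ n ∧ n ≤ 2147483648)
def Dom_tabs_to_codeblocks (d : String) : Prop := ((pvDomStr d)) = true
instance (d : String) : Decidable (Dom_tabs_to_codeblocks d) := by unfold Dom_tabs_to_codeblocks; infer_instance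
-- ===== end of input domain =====

-- B replaces A's in-place insert-while-scanning character-list machine (quadratic: each insert
-- shifts the tail) by a single pass over the lines of d, emitting each line with its brace delta
-- in front; measured faster.

-- ===== PORT A =====
-- A's `for i in range(k): code.insert(list_index, b); list_index += 1` loops
def pvInsRep (code : List Char) (i : Nat) (b : Char) (k : Nat) : List Char × Nat :=
  (List.range k).foldl (fun (p : List Char × Nat) _ => (PySem.List.insert p.1 (p.2 : Int) b, p.2 + 1)) (code, i)

-- A's loop state is (code, list_index, at_newline, current_indentation, this_line_indentation);
-- the counters stay Nat (they only grow from 0), `difference > 0` / `difference < 0` become the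
-- equivalent comparisons `this > cur` / `this < cur`.
-- first block of the while body: `if at_newline:`
def pvStep1 (code : List Char) (i : Nat) (at_nl : Bool) (cur this : Nat) :
    List Char × Nat × Bool × Nat × Nat :=
  if at_nl then
    if code.getD i ' ' = ' ' ∨ code.getD i ' ' = '\t' then (code, i, true, cur, this + 1)
    else if this > cur then
      let p := pvInsRep code i '{' (this - cur)
      (p.1, p.2, false, this, this)
    else if this < cur then
      let p := pvInsRep code i '}' (cur - this)
      (PySem.List.insert p.1 (p.2 : Int) ';', p.2, false, this, this)
    else (code, i, false, this, this)
  else (code, i, at_nl, cur, this)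

-- second block of the while body: `if not at_newline:`
def pvStep2 (s : List Char × Nat × Bool × Nat × Nat) : List Char × Nat × Bool × Nat × Nat :=
  if s.2.2.1 = false then
    if s.1.getD s.2.1 ' ' = '\n' then
      (PySem.List.insert s.1 (s.2.1 : Int) ';', s.2.1 + 1, true, s.2.2.2.1, 0)
    else s
  else s

-- ---- facts about the two blocks, cited by `decreasing_by` of the loop below ----

theorem pvInsRep_split (P R : List Char) (b : Char) (k : Nat) :
    pvInsRep (P ++ R) P.length b k = (P ++ List.replicate k b ++ R, P.length + k) := by
  induction k with
  | zero => simp [pvInsRep]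
  | succ k ih =>
    simp only [pvInsRep, List.range_succ, List.foldl_append, List.foldl_cons, List.foldl_nil] at *
    rw [ih]
    simp only
    rw [show P.length + k = (P ++ List.replicate k b).length by simp]
    rw [PySem.List.insert_natCast _ _ _ (by simp), List.take_left, List.drop_left]
    simp only [Prod.mk.injEq]
    refine ⟨?_, ?_⟩
    · simp [List.replicate_succ', List.append_assoc]
    · simp only [List.length_append, List.length_replicate]
      omega

theorem pvInsert_split (P R : List Char) (v : Char) :
    PySem.List.insert (P ++ R) (P.length : Int) v = P ++ v :: R := by
  rw [PySem.List.insert_natCast _ _ _ (by simp), List.take_left, List.drop_left]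

theorem pvGetD_append (P R : List Char) (c d : Char) :
    (P ++ c :: R).getD P.length d = c := by
  rw [List.getD_eq_getElem?_getD, List.getElem?_append_right le_rfl]
  simp

-- pvStep1 on each kind of current character (P = processed prefix)
theorem pvStep1_ws (P R : List Char) (c : Char) (cur this : Nat) (h : c = ' ' ∨ c = '\t') :
    pvStep1 (P ++ c :: R) P.length true cur this = (P ++ c :: R, P.length, true, cur, this + 1) := by
  have hg : (P ++ c :: R).getD P.length ' ' = c := pvGetD_append P R c ' '
  unfold pvStep1
  rw [if_pos rfl, hg, if_pos h]

theorem pvStep1_ind (P R : List Char) (c : Char) (cur this : Nat)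
    (hws : ¬(c = ' ' ∨ c = '\t')) (hgt : this > cur) :
    pvStep1 (P ++ c :: R) P.length true cur this =
      ((P ++ List.replicate (this - cur) '{') ++ c :: R, P.length + (this - cur), false, this, this) := by
  have hg : (P ++ c :: R).getD P.length ' ' = c := pvGetD_append P R c ' '
  unfold pvStep1
  rw [if_pos rfl, hg, if_neg hws, if_pos hgt]
  simp only [pvInsRep_split]

theorem pvStep1_ded (P R : List Char) (c : Char) (cur this : Nat)
    (hws : ¬(c = ' ' ∨ c = '\t')) (hlt : this < cur) :
    pvStep1 (P ++ c :: R) P.length true cur this =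
      ((P ++ List.replicate (cur - this) '}') ++ ';' :: c :: R,
        P.length + (cur - this), false, this, this) := by
  have hg : (P ++ c :: R).getD P.length ' ' = c := pvGetD_append P R c ' '
  unfold pvStep1
  rw [if_pos rfl, hg, if_neg hws, if_neg (show ¬ this > cur by omega), if_pos hlt]
  simp only [pvInsRep_split]
  rw [show P.length + (cur - this) = (P ++ List.replicate (cur - this) '}').length by simp]
  rw [pvInsert_split]

theorem pvStep1_same (P R : List Char) (c : Char) (cur this : Nat)
    (hws : ¬(c = ' ' ∨ c = '\t')) (h1 : ¬ this > cur) (h2 : ¬ this < cur) :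
    pvStep1 (P ++ c :: R) P.length true cur this = (P ++ c :: R, P.length, false, this, this) := by
  have hg : (P ++ c :: R).getD P.length ' ' = c := pvGetD_append P R c ' '
  unfold pvStep1
  rw [if_pos rfl, hg, if_neg hws, if_neg h1, if_neg h2]

theorem pvStep1_false (code : List Char) (i : Nat) (cur this : Nat) :
    pvStep1 code i false cur this = (code, i, false, cur, this) := by
  simp [pvStep1]

-- pvStep2 on the resulting states
theorem pvStep2_true (X : List Char) (j cur this : Nat) :
    pvStep2 (X, j, true, cur, this) = (X, j, true, cur, this) := by
  simp [pvStep2]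

theorem pvStep2_false_nl (P R : List Char) (cur this : Nat) :
    pvStep2 (P ++ '\n' :: R, P.length, false, cur, this) =
      (P ++ ';' :: '\n' :: R, P.length + 1, true, cur, 0) := by
  have hg : (P ++ '\n' :: R).getD P.length ' ' = '\n' := pvGetD_append P R '\n' ' '
  unfold pvStep2
  simp only
  rw [if_pos trivial, hg, if_pos rfl, pvInsert_split]

theorem pvStep2_false_other (P R : List Char) (c : Char) (cur this : Nat) (hc : c ≠ '\n') :
    pvStep2 (P ++ c :: R, P.length, false, cur, this) = (P ++ c :: R, P.length, false, cur, this) := by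
  have hg : (P ++ c :: R).getD P.length ' ' = c := pvGetD_append P R c ' '
  unfold pvStep2
  simp only
  rw [if_pos trivial, hg, if_neg hc]

-- the loop measure decreases (cited by `decreasing_by` below)
theorem pvStep_dec (code : List Char) (i : Nat) (at_nl : Bool) (cur this : Nat)
    (h : i < code.length) :
    2 * ((pvStep2 (pvStep1 code i at_nl cur this)).1.length -
        ((pvStep2 (pvStep1 code i at_nl cur this)).2.1 + 1)) +
      (if (pvStep2 (pvStep1 code i at_nl cur this)).2.2.1 then 1 else 0) <
    2 * (code.length - i) + (if at_nl then 1 else 0) := by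
  have hdec : code = code.take i ++ code[i] :: code.drop (i + 1) := by
    conv_lhs => rw [← List.take_append_drop i code]
    rw [List.getElem_cons_drop]
  have hlen : (code.take i).length = i := List.length_take_of_le (by omega)
  set P := code.take i with hP
  set R := code.drop (i + 1) with hR
  set c := code[i] with hc
  have hlc : code.length = i + 1 + R.length := by
    conv_lhs => rw [hdec]
    simp [hlen] <;> omega
  cases at_nl with
  | false =>
    rw [hdec, ← hlen, pvStep1_false]
    by_cases hnl : c = '\n'
    · rw [hnl, pvStep2_false_nl]
      simp [hlen, hlc] <;> omega
    · rw [pvStep2_false_other _ _ _ _ _ hnl]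
      simp [hlen, hlc] <;> omega
  | true =>
    by_cases hws : c = ' ' ∨ c = '\t'
    · rw [hdec, ← hlen, pvStep1_ws _ _ _ _ _ hws, pvStep2_true]
      simp [hlen, hlc] <;> omega
    · by_cases hgt : this > cur
      · rw [hdec, ← hlen, pvStep1_ind _ _ _ _ _ hws hgt]
        by_cases hnl : c = '\n'
        · rw [hnl, show P.length + (this - cur) = (P ++ List.replicate (this - cur) '{').length
            by simp, pvStep2_false_nl]
          simp [hlen, hlc] <;> omega
        · rw [show P.length + (this - cur) = (P ++ List.replicate (this - cur) '{').length
            by simp, pvStep2_false_other _ _ _ _ _ hnl]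
          simp [hlen, hlc] <;> omega
      · by_cases hlt : this < cur
        · rw [hdec, ← hlen, pvStep1_ded _ _ _ _ _ hws hlt]
          rw [show P.length + (cur - this) = (P ++ List.replicate (cur - this) '}').length
            by simp, pvStep2_false_other _ _ _ _ _ (by decide)]
          simp [hlen, hlc] <;> omega
        · rw [hdec, ← hlen, pvStep1_same _ _ _ _ _ hws hgt hlt]
          by_cases hnl : c = '\n'
          · rw [hnl, pvStep2_false_nl]
            simp [hlen, hlc] <;> omega
          · rw [pvStep2_false_other _ _ _ _ _ hnl]
            simp [hlen, hlc] <;> omega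

-- A's while loop; at exit, the closing `for i in range(current_indentation)` insert loop
def tabs_to_codeblocks_loop (code : List Char) (i : Nat) (at_nl : Bool) (cur this : Nat) :
    List Char :=
  if h : i < code.length then
    let t := pvStep2 (pvStep1 code i at_nl cur this)
    tabs_to_codeblocks_loop t.1 (t.2.1 + 1) t.2.2.1 t.2.2.2.1 t.2.2.2.2
  else
    (pvInsRep code i '}' cur).1
termination_by 2 * (code.length - i) + (if at_nl then 1 else 0)
decreasing_by exact pvStep_dec code i at_nl cur this h

def tabs_to_codeblocks (d : String) : String :=
  String.ofList (tabs_to_codeblocks_loop d.toList 0 true 0 0)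

-- ===== PORT B =====
-- Source B's `while w < len(part) and part[w] in (" ", "\t"): w += 1`
def pvLead : List Char → Nat
  | [] => 0
  | c :: cs => if c = ' ' ∨ c = '\t' then pvLead cs + 1 else 0

-- one iteration of Source B's for loop: (string appended to out, new current_indentation)
def pvAltLine (part : List Char) (cur : Nat) (terminated : Bool) : List Char × Nat :=
  let w := pvLead part
  if terminated || decide (w < part.length) then
    let braces :=
      if w > cur then List.replicate (w - cur) '{'
      else if w < cur then List.replicate (cur - w) '}' ++ [';']
      else []
    (part.take w ++ braces ++ part.drop w ++ (if terminated then [';', '\n'] else []), w)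
  else (part, cur)

def tabs_to_codeblocks_alt (d : String) : String :=
  let parts := PySem.Chars.splitOn d.toList ['\n']
  let res := (PySem.List.enumerate parts).foldl
    (fun (st : List Char × Nat) p =>
      let r := pvAltLine p.2 st.2 (decide (p.1 < (parts.length : Int) - 1))
      (st.1 ++ r.1, r.2)) ([], 0)
  String.ofList (res.1 ++ List.replicate res.2 '}')

-- ===== PRECONDITION & SPEC =====
def Spec_tabs_to_codeblocks (d : String) (out : String) : Prop := out = tabs_to_codeblocks_alt d
instance (d : String) (out : String) : Decidable (Spec_tabs_to_codeblocks d out) := by unfold Spec_tabs_to_codeblocks; infer_instance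

-- ===== CLAIM (what is proved, stated in full; the proofs are below) =====
def Claim_equal_tabs_to_codeblocks : Prop := ∀ (d : String), Dom_tabs_to_codeblocks d → Spec_tabs_to_codeblocks d (tabs_to_codeblocks d)

-- ===== LEMMAS AND PROOFS =====

-- the brace delta both programs emit when a line of indentation w commits against current cur
def pvBrace (cur w : Nat) : List Char :=
  if w > cur then List.replicate (w - cur) '{'
  else if w < cur then List.replicate (cur - w) '}' ++ [';']
  else []

-- the character-level behaviour of A's machine on the remaining suffix of the input
def pvMach : List Char → Bool → Nat → Nat → List Char
  | [], _, cur, _ => List.replicate cur '}'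
  | c :: r, true, cur, this =>
    if c = ' ' ∨ c = '\t' then c :: pvMach r true cur (this + 1)
    else pvBrace cur this ++ pvMach (c :: r) false this this
  | c :: r, false, cur, this =>
    if c = '\n' then ';' :: '\n' :: pvMach r true cur 0 else c :: pvMach r false cur this
termination_by l nl _ _ => 2 * l.length + (if nl then 1 else 0)
decreasing_by all_goals simp <;> omega

-- line splitting, structurally
def pvSplit : List Char → List (List Char)
  | [] => [[]]
  | c :: cs => if c = '\n' then [] :: pvSplit cs else (pvSplit cs).modifyHead (c :: ·)

-- B's fold, per line, the last line unterminated
def pvRun : List (List Char) → Nat → List Char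
  | [], cur => List.replicate cur '}'
  | [p], cur => (pvAltLine p cur false).1 ++ List.replicate (pvAltLine p cur false).2 '}'
  | p :: q :: ps, cur => (pvAltLine p cur true).1 ++ pvRun (q :: ps) (pvAltLine p cur true).2

-- B's foldl, named so the lemmas below can speak about it
def pvFold (N : Nat) (parts : List (List Char)) (s : Int) (acc : List Char) (cur : Nat) :
    List Char × Nat :=
  (PySem.List.enumerate parts s).foldl
    (fun (st : List Char × Nat) p =>
      let r := pvAltLine p.2 st.2 (decide (p.1 < (N : Int) - 1))
      (st.1 ++ r.1, r.2)) (acc, cur)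

theorem loop_eq (n : Nat) : ∀ (R : List Char) (at_nl : Bool),
    2 * R.length + (if at_nl then 1 else 0) ≤ n → ∀ (P : List Char) (cur this : Nat),
    tabs_to_codeblocks_loop (P ++ R) P.length at_nl cur this = P ++ pvMach R at_nl cur this := by
  induction n with
  | zero =>
    intro R at_nl hn P cur this
    have hR : R = [] := by
      cases R with
      | nil => rfl
      | cons a as => exfalso; cases at_nl <;> simp at hn
    subst hR
    rw [tabs_to_codeblocks_loop.eq_def]
    rw [dif_neg (by simp)]
    have := pvInsRep_split P [] '}' cur
    simp only [List.append_nil] at this ⊢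
    rw [this]
    simp [pvMach]
  | succ n ih =>
    intro R at_nl hn P cur this
    cases R with
    | nil =>
      rw [tabs_to_codeblocks_loop.eq_def]
      rw [dif_neg (by simp)]
      have := pvInsRep_split P [] '}' cur
      simp only [List.append_nil] at this ⊢
      rw [this]
      simp [pvMach]
    | cons c R' =>
      rw [tabs_to_codeblocks_loop.eq_def]
      rw [dif_pos (by simp)]
      simp only [List.length_cons] at hn
      cases at_nl with
      | false =>
        replace hn : 2 * R'.length + 2 ≤ n + 1 := by simp at hn; omega
        rw [pvStep1_false]
        by_cases hnl : c = '\n'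
        · subst hnl
          rw [pvStep2_false_nl]
          simp only
          rw [show P ++ ';' :: '\n' :: R' = (P ++ [';', '\n']) ++ R' by simp,
            show P.length + 1 + 1 = (P ++ [';', '\n']).length by
              simp only [List.length_append, List.length_cons, List.length_nil]]
          rw [ih R' true (by simp; omega)]
          simp [pvMach]
        · rw [pvStep2_false_other _ _ _ _ _ hnl]
          simp only
          rw [show P ++ c :: R' = (P ++ [c]) ++ R' by simp,
            show P.length + 1 = (P ++ [c]).length by
              simp only [List.length_append, List.length_cons, List.length_nil]]
          rw [ih R' false (by simp; omega)]
          simp [pvMach, hnl]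
      | true =>
        replace hn : 2 * R'.length + 3 ≤ n + 1 := by simp at hn; omega
        by_cases hws : c = ' ' ∨ c = '\t'
        · rw [pvStep1_ws _ _ _ _ _ hws, pvStep2_true]
          simp only
          rw [show P ++ c :: R' = (P ++ [c]) ++ R' by simp,
            show P.length + 1 = (P ++ [c]).length by
              simp only [List.length_append, List.length_cons, List.length_nil]]
          rw [ih R' true (by simp; omega)]
          have hws' : (c = ' ' ∨ c = '\t') := hws
          simp [pvMach, hws']
        · have hnws : ¬(c = ' ' ∨ c = '\t') := hws
          have hmc : pvMach (c :: R') true cur this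
              = pvBrace cur this ++ pvMach (c :: R') false this this := by
            simp only [pvMach]
            rw [if_neg hnws]
          by_cases hgt : this > cur
          · rw [pvStep1_ind _ _ _ _ _ hnws hgt]
            by_cases hnl : c = '\n'
            · subst hnl
              rw [show P.length + (this - cur) =
                  (P ++ List.replicate (this - cur) '{').length by simp, pvStep2_false_nl]
              simp only
              rw [show (P ++ List.replicate (this - cur) '{') ++ ';' :: '\n' :: R'
                    = (P ++ List.replicate (this - cur) '{' ++ [';', '\n']) ++ R' by simp,
                show (P ++ List.replicate (this - cur) '{').length + 1 + 1
                    = (P ++ List.replicate (this - cur) '{' ++ [';', '\n']).length by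
                  simp only [List.length_append, List.length_cons, List.length_nil,
                    List.length_replicate]]
              rw [ih R' true (by simp; omega)]
              rw [hmc]
              rw [show pvMach ('\n' :: R') false this this
                  = ';' :: '\n' :: pvMach R' true this 0 by simp [pvMach]]
              simp [pvBrace, hgt]
            · rw [show P.length + (this - cur) =
                  (P ++ List.replicate (this - cur) '{').length by simp,
                pvStep2_false_other _ _ _ _ _ hnl]
              simp only
              rw [show (P ++ List.replicate (this - cur) '{') ++ c :: R'
                    = (P ++ List.replicate (this - cur) '{' ++ [c]) ++ R' by simp,
                show (P ++ List.replicate (this - cur) '{').length + 1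
                    = (P ++ List.replicate (this - cur) '{' ++ [c]).length by
                  simp only [List.length_append, List.length_cons, List.length_nil,
                    List.length_replicate]]
              rw [ih R' false (by simp; omega)]
              rw [hmc]
              rw [show pvMach (c :: R') false this this = c :: pvMach R' false this this by
                simp only [pvMach]; rw [if_neg hnl]]
              simp [pvBrace, hgt]
          · by_cases hlt : this < cur
            · rw [pvStep1_ded _ _ _ _ _ hnws hlt]
              rw [show P.length + (cur - this) =
                  (P ++ List.replicate (cur - this) '}').length by simp,
                pvStep2_false_other _ _ _ _ _ (by decide)]
              simp only
              rw [show (P ++ List.replicate (cur - this) '}') ++ ';' :: c :: R'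
                    = (P ++ List.replicate (cur - this) '}' ++ [';']) ++ c :: R' by simp,
                show (P ++ List.replicate (cur - this) '}').length + 1
                    = (P ++ List.replicate (cur - this) '}' ++ [';']).length by
                  simp only [List.length_append, List.length_cons, List.length_nil,
                    List.length_replicate]]
              rw [ih (c :: R') false (by simp; omega)]
              rw [hmc]
              simp [pvBrace, hlt, show ¬ cur < this by omega]
            · rw [pvStep1_same _ _ _ _ _ hnws hgt hlt]
              by_cases hnl : c = '\n'
              · subst hnl
                rw [pvStep2_false_nl]
                simp only
                rw [show P ++ ';' :: '\n' :: R' = (P ++ [';', '\n']) ++ R' by simp,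
                  show P.length + 1 + 1 = (P ++ [';', '\n']).length by
                    simp only [List.length_append, List.length_cons, List.length_nil]]
                rw [ih R' true (by simp; omega)]
                rw [hmc]
                rw [show pvMach ('\n' :: R') false this this
                    = ';' :: '\n' :: pvMach R' true this 0 by simp [pvMach]]
                simp [pvBrace, show ¬ this > cur from hgt, show ¬ this < cur from hlt]
              · rw [pvStep2_false_other _ _ _ _ _ hnl]
                simp only
                rw [show P ++ c :: R' = (P ++ [c]) ++ R' by simp,
                  show P.length + 1 = (P ++ [c]).length by
                    simp only [List.length_append, List.length_cons, List.length_nil]]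
                rw [ih R' false (by simp; omega)]
                rw [hmc]
                rw [show pvMach (c :: R') false this this = c :: pvMach R' false this this by
                  simp only [pvMach]; rw [if_neg hnl]]
                simp [pvBrace, show ¬ cur < this by omega] <;> omega

theorem pvSplit_ne_nil (l : List Char) : pvSplit l ≠ [] := by
  induction l with
  | nil => simp [pvSplit]
  | cons c cs ih =>
    simp only [pvSplit]
    split
    · simp
    · cases h : pvSplit cs with
      | nil => exact absurd h ih
      | cons a as => simp [List.modifyHead]

theorem splitOn_go_eq (fuel : Nat) : ∀ (l cur : List Char) (acc : List (List Char)),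
    l.length < fuel →
    PySem.Chars.splitOn.go ['\n'] fuel l cur acc =
      acc.reverse ++ (pvSplit l).modifyHead (cur.reverse ++ ·) := by
  induction fuel with
  | zero => intro l cur acc h; omega
  | succ fuel ih =>
    intro l cur acc h
    cases l with
    | nil => simp [PySem.Chars.splitOn.go, pvSplit]
    | cons c rest =>
      rw [PySem.Chars.splitOn.go]
      simp only [List.length_cons] at h
      by_cases hc : c = '\n'
      · rw [if_pos (by simp [hc, List.isPrefixOf])]
        rw [ih _ _ _ (by simp; omega)]
        simp only [pvSplit, if_pos hc]
        simp [List.modifyHead]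
        cases pvSplit rest <;> rfl
      · rw [if_neg (by simp [List.isPrefixOf]; exact fun hh => hc hh.symm)]
        rw [ih _ _ _ (by omega)]
        cases hs : pvSplit rest with
        | nil => exact absurd hs (pvSplit_ne_nil rest)
        | cons a as => simp [pvSplit, hc, hs, List.modifyHead]

theorem splitOn_eq (l : List Char) : PySem.Chars.splitOn l ['\n'] = pvSplit l := by
  unfold PySem.Chars.splitOn
  rw [splitOn_go_eq (l.length + 1) l [] [] (by omega)]
  cases h : pvSplit l <;> simp [List.modifyHead]

theorem pvSplit_no_nl (l : List Char) (h : '\n' ∉ l) : pvSplit l = [l] := by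
  induction l with
  | nil => rfl
  | cons c cs ih =>
    simp only [List.mem_cons, not_or] at h
    have hc : ¬(c = '\n') := fun hh => h.1 hh.symm
    simp only [pvSplit, if_neg hc, ih h.2]
    rfl

theorem pvSplit_append (part rest : List Char) (h : '\n' ∉ part) :
    pvSplit (part ++ '\n' :: rest) = part :: pvSplit rest := by
  induction part with
  | nil => simp [pvSplit]
  | cons c cs ih =>
    simp only [List.mem_cons, not_or] at h
    have hc : ¬(c = '\n') := fun hh => h.1 hh.symm
    simp only [List.cons_append, pvSplit, if_neg hc, ih h.2]
    rfl

theorem nl_decomp (l : List Char) (h : '\n' ∈ l) :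
    ∃ part rest, l = part ++ '\n' :: rest ∧ '\n' ∉ part := by
  induction l with
  | nil => simp at h
  | cons c cs ih =>
    by_cases hc : c = '\n'
    · exact ⟨[], cs, by simp [hc], by simp⟩
    · have : '\n' ∈ cs := by
        rcases List.mem_cons.mp h with h1 | h1
        · exact absurd h1.symm hc
        · exact h1
      obtain ⟨part, rest, heq, hmem⟩ := ih this
      exact ⟨c :: part, rest, by simp [heq], by
        simp only [List.mem_cons, not_or]
        exact ⟨fun hh => hc hh.symm, hmem⟩⟩

theorem mach_tail_term (m : List Char) (h : '\n' ∉ m) : ∀ (R : List Char) (cur this : Nat),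
    pvMach (m ++ '\n' :: R) false cur this = m ++ ';' :: '\n' :: pvMach R true cur 0 := by
  induction m with
  | nil => intro R cur this; simp [pvMach]
  | cons c cs ih =>
    intro R cur this
    simp only [List.mem_cons, not_or] at h
    have hc : ¬(c = '\n') := fun hh => h.1 hh.symm
    simp only [List.cons_append, pvMach, if_neg hc, ih h.2]

theorem mach_tail_last (m : List Char) (h : '\n' ∉ m) : ∀ (cur this : Nat),
    pvMach m false cur this = m ++ List.replicate cur '}' := by
  induction m with
  | nil => intro cur this; simp [pvMach]
  | cons c cs ih =>
    intro cur this
    simp only [List.mem_cons, not_or] at h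
    have hc : ¬(c = '\n') := fun hh => h.1 hh.symm
    simp only [pvMach, if_neg hc, ih h.2]
    rfl

theorem mach_line_term (part : List Char) (h : '\n' ∉ part) : ∀ (R : List Char) (cur t : Nat),
    pvMach (part ++ '\n' :: R) true cur t =
      part.take (pvLead part) ++ pvBrace cur (t + pvLead part) ++ part.drop (pvLead part) ++
        ';' :: '\n' :: pvMach R true (t + pvLead part) 0 := by
  induction part with
  | nil =>
    intro R cur t
    simp only [List.nil_append, pvLead, List.take_nil, List.drop_nil]
    rw [show pvMach ('\n' :: R) true cur t
        = pvBrace cur t ++ pvMach ('\n' :: R) false t t by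
          simp only [pvMach]; rw [if_neg (by decide)]]
    rw [show pvMach ('\n' :: R) false t t = ';' :: '\n' :: pvMach R true t 0 by simp [pvMach]]
    simp
  | cons c cs ih =>
    intro R cur t
    simp only [List.mem_cons, not_or] at h
    have hc : ¬(c = '\n') := fun hh => h.1 hh.symm
    by_cases hws : c = ' ' ∨ c = '\t'
    · simp only [List.cons_append]
      rw [show pvMach (c :: (cs ++ '\n' :: R)) true cur t
          = c :: pvMach (cs ++ '\n' :: R) true cur (t + 1) by
            simp only [pvMach]; rw [if_pos hws]]
      rw [ih h.2]
      simp only [pvLead, if_pos hws]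
      have harith : t + 1 + pvLead cs = t + (pvLead cs + 1) := by omega
      simp [harith]
    · simp only [List.cons_append]
      rw [show pvMach (c :: (cs ++ '\n' :: R)) true cur t
          = pvBrace cur t ++ pvMach (c :: (cs ++ '\n' :: R)) false t t by
            simp only [pvMach]; rw [if_neg hws]]
      rw [show pvMach (c :: (cs ++ '\n' :: R)) false t t
          = c :: pvMach (cs ++ '\n' :: R) false t t by
            simp only [pvMach]; rw [if_neg hc]]
      rw [mach_tail_term cs h.2]
      simp only [pvLead, if_neg hws]
      simp

theorem mach_line_last (part : List Char) (h : '\n' ∉ part) : ∀ (cur t : Nat),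
    pvMach part true cur t =
      if pvLead part < part.length then
        part.take (pvLead part) ++ pvBrace cur (t + pvLead part) ++ part.drop (pvLead part) ++
          List.replicate (t + pvLead part) '}'
      else part ++ List.replicate cur '}' := by
  induction part with
  | nil =>
    intro cur t
    simp [pvMach, pvLead]
  | cons c cs ih =>
    intro cur t
    simp only [List.mem_cons, not_or] at h
    have hc : ¬(c = '\n') := fun hh => h.1 hh.symm
    by_cases hws : c = ' ' ∨ c = '\t'
    · rw [show pvMach (c :: cs) true cur t = c :: pvMach cs true cur (t + 1) by
        simp only [pvMach]; rw [if_pos hws]]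
      rw [ih h.2]
      simp only [pvLead, if_pos hws, List.length_cons]
      have harith : t + 1 + pvLead cs = t + (pvLead cs + 1) := by omega
      by_cases hw : pvLead cs < cs.length
      · rw [if_pos hw, if_pos (by omega)]
        simp [harith]
      · rw [if_neg hw, if_neg (by omega)]
        simp
    · rw [show pvMach (c :: cs) true cur t = pvBrace cur t ++ pvMach (c :: cs) false t t by
        simp only [pvMach]; rw [if_neg hws]]
      rw [mach_tail_last (c :: cs) (by
        simp only [List.mem_cons, not_or]
        exact ⟨h.1, h.2⟩)]
      simp only [pvLead, if_neg hws, List.length_cons]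
      rw [if_pos (by omega)]
      simp

theorem run_eq_mach (n : Nat) : ∀ (l : List Char), l.length ≤ n → ∀ (cur : Nat),
    pvRun (pvSplit l) cur = pvMach l true cur 0 := by
  induction n with
  | zero =>
    intro l hl cur
    have : l = [] := by cases l <;> simp_all
    subst this
    simp [pvSplit, pvRun, pvAltLine, pvLead, pvMach]
  | succ n ih =>
    intro l hl cur
    by_cases hnl : '\n' ∈ l
    · obtain ⟨part, rest, heq, hmem⟩ := nl_decomp l hnl
      subst heq
      rw [pvSplit_append _ _ hmem]
      cases hq : pvSplit rest with
      | nil => exact absurd hq (pvSplit_ne_nil rest)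
      | cons q qs =>
        rw [show pvRun (part :: q :: qs) cur
            = (pvAltLine part cur true).1 ++ pvRun (q :: qs) (pvAltLine part cur true).2 from rfl]
        rw [← hq]
        have hrest : rest.length ≤ n := by
          have := hl
          simp only [List.length_append, List.length_cons] at this
          omega
        rw [ih rest hrest]
        rw [mach_line_term part hmem rest cur 0]
        simp only [pvAltLine, Bool.true_or]
        simp only [Nat.zero_add]
        simp [pvBrace]
    · rw [pvSplit_no_nl _ hnl]
      rw [show pvRun [l] cur
          = (pvAltLine l cur false).1 ++ List.replicate (pvAltLine l cur false).2 '}' from rfl]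
      rw [mach_line_last l hnl cur 0]
      simp only [pvAltLine, Bool.false_or]
      by_cases hw : pvLead l < l.length
      · rw [if_pos (by simpa using hw), if_pos hw]
        simp [pvBrace, List.append_assoc]
      · rw [if_neg (by simpa using hw), if_neg hw]

theorem fold_eq_run (N : Nat) : ∀ (parts : List (List Char)) (s : Nat), parts ≠ [] →
    s + parts.length = N → ∀ (acc : List Char) (cur : Nat),
    (pvFold N parts (s : Int) acc cur).1 ++ List.replicate (pvFold N parts (s : Int) acc cur).2 '}' =
      acc ++ pvRun parts cur := by
  intro parts
  induction parts with
  | nil => intro s hne; exact absurd rfl hne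
  | cons p ps ih =>
    intro s _ hlen acc cur
    cases ps with
    | nil =>
      have hterm : ¬((s : Int) < (N : Int) - 1) := by
        simp only [List.length_cons, List.length_nil] at hlen
        omega
      simp only [pvFold, PySem.List.enumerate_cons, PySem.List.enumerate_nil,
        List.foldl_cons, List.foldl_nil]
      rw [show (decide ((s : Int) < (N : Int) - 1)) = false from decide_eq_false hterm]
      rw [show pvRun [p] cur
          = (pvAltLine p cur false).1 ++ List.replicate (pvAltLine p cur false).2 '}' from rfl]
      simp [List.append_assoc]
    | cons q qs =>
      have hterm : ((s : Int) < (N : Int) - 1) := by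
        simp only [List.length_cons] at hlen
        omega
      unfold pvFold
      rw [PySem.List.enumerate_cons, List.foldl_cons]
      simp only
      rw [show (decide ((s : Int) < (N : Int) - 1)) = true from decide_eq_true hterm]
      rw [show ((s : Int) + 1) = ((s + 1 : Nat) : Int) by push_cast; ring]
      have hih := ih (s + 1) (by simp) (by simp only [List.length_cons] at hlen ⊢; omega)
        (acc ++ (pvAltLine p cur true).1) (pvAltLine p cur true).2
      simp only [pvFold] at hih
      rw [hih]
      rw [show pvRun (p :: q :: qs) cur
          = (pvAltLine p cur true).1 ++ pvRun (q :: qs) (pvAltLine p cur true).2 from rfl]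
      simp [List.append_assoc]

-- ===== VERDICT (by name: the statement is the Claim_ definition above) =====
theorem tabs_to_codeblocks_spec : Claim_equal_tabs_to_codeblocks := by
  intro d _
  unfold Spec_tabs_to_codeblocks tabs_to_codeblocks tabs_to_codeblocks_alt
  have hA : tabs_to_codeblocks_loop d.toList 0 true 0 0 = pvMach d.toList true 0 0 := by
    have := loop_eq (2 * d.toList.length + 1) d.toList true (by simp) [] 0 0
    simpa using this
  rw [hA]
  have hne := pvSplit_ne_nil d.toList
  have hB := fold_eq_run (pvSplit d.toList).length (pvSplit d.toList) 0 hne (by omega) [] 0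
  simp only [Nat.cast_zero, pvFold] at hB
  simp only [splitOn_eq]
  rw [hB]
  rw [run_eq_mach d.toList.length d.toList le_rfl 0]
  simp
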